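-- pv_equiv track=rewrite | github.com/ctmes/computer_networks | lab01/hamming_dist.py | checking_codewords
-- ===== SOURCE A (Python) =====
-- def hamming_distance(a, b):
--     L = len(a)
--     hd = 0
--
--     for i in range(L):
--         if a[i] != b[i]:
--             hd += 1
--
--     return hd
--
-- def checking_codewords(codewords, received_data):
--     min_distance = float('inf')
--     candidate = None
--     candidate_count = 0
--
--     for codeword in codewords:
--         distance = hamming_distance(codeword, received_data)
--         if distance < min_distance:
--             min_distance = distance
--             candidate = codeword
--             candidate_count = 1
--         elif distance == min_distance:
--             candidate_count += 1
--
--     if candidate_count == 1: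
--         return candidate
--     else:
--         return 'error detected'
-- ===== SOURCE B (Python) =====
-- def checking_codewords(codewords, received_data):
--     # Sort (distance, codeword) pairs by distance; stability keeps the first
--     # minimizer first.  Unique minimum iff the second entry (if any) is farther.
--     pairs = sorted(((sum(x != y for x, y in zip(cw, received_data)), cw)
--                     for cw in codewords), key=lambda p: p[0])
--     if not pairs:
--         return 'error detected'
--     if len(pairs) > 1 and pairs[1][0] == pairs[0][0]:
--         return 'error detected'
--     return pairs[0][1]
-- ===== Notes on version B (the rewrite author's own statement) =====
-- stated objective: alternative
-- what changed: A does one fused pass tracking running min distance, candidate and tie count; B instead stably sorts the (hamming distance, codeword) pairs by distance and decides from the first two entries of the sorted list (stability makes the head the first minimizer, a distance tie between entries 0 and 1 signals 'error detected').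
import Mathlib
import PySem

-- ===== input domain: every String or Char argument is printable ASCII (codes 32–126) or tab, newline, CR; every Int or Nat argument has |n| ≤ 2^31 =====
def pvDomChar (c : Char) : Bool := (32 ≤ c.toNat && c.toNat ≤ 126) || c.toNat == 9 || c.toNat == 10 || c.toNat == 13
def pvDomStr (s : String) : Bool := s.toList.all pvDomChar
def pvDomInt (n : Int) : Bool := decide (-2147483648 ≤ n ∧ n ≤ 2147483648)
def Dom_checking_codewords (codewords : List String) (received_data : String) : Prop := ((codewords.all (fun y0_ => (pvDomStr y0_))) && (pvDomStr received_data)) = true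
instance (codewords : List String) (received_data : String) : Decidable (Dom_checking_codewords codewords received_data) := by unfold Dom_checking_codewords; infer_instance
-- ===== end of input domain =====

-- B replaces A's single-pass min/candidate/tie-count tracking by a stable SORT of
-- (distance, codeword) pairs followed by a look at the first two entries
-- (objective: alternative algorithm; return value only, no mutation).

-- ===== PORT A =====
-- hamming_distance: loop over range(len(a)) comparing a[i] with b[i].
-- Exact on Pre_ (len a ≤ len b); where Python raises IndexError (b[i] out of range),
-- pyGet? returns none and the comparison counts it as a mismatch — such inputs are outside Pre_.
def pvHammingA (a b : String) : Int :=
  (PySem.List.pyRange 0 (a.toList.length : Int) 1).foldl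
    (fun hd i => if PySem.List.pyGet? a.toList i ≠ PySem.List.pyGet? b.toList i then hd + 1 else hd) 0

-- the loop body of A: state (min_distance, candidate, candidate_count); None models float('inf') / candidate None
def pvStepA (rd : String) (s : Option Int × Option String × Int) (cw : String) :
    Option Int × Option String × Int :=
  let d := pvHammingA cw rd
  match s.1 with
  | none => (some d, some cw, 1)
  | some m =>
    if d < m then (some d, some cw, 1)
    else if d = m then (some m, s.2.1, s.2.2 + 1)
    else s

def checking_codewords (codewords : List String) (received_data : String) : String :=
  let s := codewords.foldl (pvStepA received_data) (none, none, 0)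
  if s.2.2 = 1 then s.2.1.getD "error detected" else "error detected"

-- ===== PORT B =====
-- sum(x != y for x, y in zip(cw, received_data))
def pvHammingB (a b : String) : Int :=
  (a.toList.zip b.toList).foldl (fun n p => if p.1 ≠ p.2 then n + 1 else n) 0

-- sorted(..., key=lambda p: p[0]); then inspect the first two entries
def checking_codewords_alt (codewords : List String) (received_data : String) : String :=
  let pairs := PySem.List.sorted
    (codewords.map (fun cw => (pvHammingB cw received_data, cw))) (fun p => p.1) false
  match pairs with
  | [] => "error detected"
  | p0 :: rest =>
    match rest with
    | p1 :: _ => if p1.1 = p0.1 then "error detected" else p0.2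
    | [] => p0.2

-- ===== PRECONDITION & SPEC =====
-- Pre_ excludes exactly the inputs where A raises IndexError: some codeword longer than received_data.
def Pre_checking_codewords (codewords : List String) (received_data : String) : Prop :=
  ∀ cw ∈ codewords, cw.toList.length ≤ received_data.toList.length
instance (codewords : List String) (received_data : String) : Decidable (Pre_checking_codewords codewords received_data) := by unfold Pre_checking_codewords; infer_instance

def pvWitness_checking_codewords : List String × String := (["010", "101", "011"], "011")

def Spec_checking_codewords (codewords : List String) (received_data : String) (out : String) : Prop := out = checking_codewords_alt codewords received_data
instance (codewords : List String) (received_data : String) (out : String) : Decidable (Spec_checking_codewords codewords received_data out) := by unfold Spec_checking_codewords; infer_instance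

-- ===== CLAIM (what is proved, stated in full; the proofs are below) =====
def Claim_equal_checking_codewords : Prop := ∀ (codewords : List String) (received_data : String), Dom_checking_codewords codewords received_data → Pre_checking_codewords codewords received_data → Spec_checking_codewords codewords received_data (checking_codewords codewords received_data)

-- ===== LEMMAS AND PROOFS =====

lemma pv_zip_append_singleton (l lb : List Char) (c : Char) (h : l.length < lb.length) :
    (l ++ [c]).zip lb = l.zip lb ++ [(c, lb.getD l.length c)] := by
  induction l generalizing lb with
  | nil => cases lb with
    | nil => simp at h
    | cons y ys => simp [List.zip]
  | cons x xs ih =>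
    cases lb with
    | nil => simp at h
    | cons y ys =>
      simp only [List.cons_append, List.zip_cons_cons, List.length_cons] at *
      rw [ih ys (by omega)]
      simp

lemma pv_ham_list (la lb : List Char) (acc : Int) (h : la.length ≤ lb.length) :
    (PySem.List.pyRange 0 (la.length : Int) 1).foldl
      (fun hd i => if PySem.List.pyGet? la i ≠ PySem.List.pyGet? lb i then hd + 1 else hd) acc
    = (la.zip lb).foldl (fun n p => if p.1 ≠ p.2 then n + 1 else n) acc := by
  induction la using List.reverseRecOn generalizing acc with
  | nil => simp [PySem.List.pyRange_one_eq_nil]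
  | append_singleton l c ih =>
    have hn : l.length < lb.length := by simpa using h
    have hlen : ((l ++ [c]).length : Int) = (l.length : Int) + 1 := by simp
    rw [hlen, PySem.List.pyRange_one_succ_right (by positivity), List.foldl_append,
        pv_zip_append_singleton l lb c hn, List.foldl_append]
    have hcong :
        (PySem.List.pyRange 0 (l.length : Int) 1).foldl
          (fun hd i => if PySem.List.pyGet? (l ++ [c]) i ≠ PySem.List.pyGet? lb i then hd + 1 else hd) acc
        = (PySem.List.pyRange 0 (l.length : Int) 1).foldl
          (fun hd i => if PySem.List.pyGet? l i ≠ PySem.List.pyGet? lb i then hd + 1 else hd) acc := by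
      apply PySem.List.foldl_congr_mem
      intro a i hi
      have hib := (PySem.List.mem_pyRange_one).mp hi
      have h0 : (0:Int) ≤ i := hib.1
      have h1 : i < (l.length : Int) := hib.2
      have hlt : i.toNat < l.length := by omega
      rw [PySem.List.pyGet?_of_nonneg _ h0, PySem.List.pyGet?_of_nonneg _ h0,
          List.getElem?_append_left hlt, PySem.List.pyGet?_of_nonneg _ h0]
    rw [hcong, ih acc (by omega)]
    simp only [List.foldl_cons, List.foldl_nil]
    have hget : PySem.List.pyGet? (l ++ [c]) (l.length : Int) = some c := by
      simp
    have hgetb : PySem.List.pyGet? lb (l.length : Int) = some lb[l.length] := by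
      rw [PySem.List.pyGet?_of_nonneg _ (by positivity)]
      simp [List.getElem?_eq_getElem hn]
    rw [hget, hgetb]
    have hgd : lb.getD l.length c = lb[l.length] := List.getD_eq_getElem lb c hn
    rw [hgd]
    by_cases hc : c = lb[l.length] <;> simp [hc]

lemma pv_ham_eq (a b : String) (h : a.toList.length ≤ b.toList.length) :
    pvHammingA a b = pvHammingB a b := by
  unfold pvHammingA pvHammingB
  exact pv_ham_list a.toList b.toList 0 h

-- running strict-< minimum over (key, payload) pairs, first minimizer kept
def pvBestP (ps : List (Int × String)) : Option (Int × String) :=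
  ps.foldl (fun o p => match o with
    | none => some p
    | some q => if p.1 < q.1 then some p else some q) none

lemma pvBestP_append (ps : List (Int × String)) (x : Int × String) :
    pvBestP (ps ++ [x]) = match pvBestP ps with
      | none => some x
      | some q => if x.1 < q.1 then some x else some q := by
  unfold pvBestP; rw [List.foldl_append]; rfl

lemma pvBestP_append_isSome (l : List (Int × String)) (x : Int × String) :
    (pvBestP (l ++ [x])).isSome := by
  rw [pvBestP_append]
  cases pvBestP l with
  | none => rfl
  | some q => by_cases h : x.1 < q.1 <;> simp [h]

lemma pvBestP_eq_none_iff (ps : List (Int × String)) : pvBestP ps = none ↔ ps = [] := by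
  constructor
  · intro h
    cases ps using List.reverseRecOn with
    | nil => rfl
    | append_singleton l x =>
      have hs := pvBestP_append_isSome l x
      rw [h] at hs
      simp at hs
  · intro h; subst h; rfl

lemma pvBestP_isMin (ps : List (Int × String)) (m : Int × String)
    (h : pvBestP ps = some m) : ∀ p ∈ ps, m.1 ≤ p.1 := by
  induction ps using List.reverseRecOn generalizing m with
  | nil => simp [pvBestP] at h
  | append_singleton l x ih =>
    rw [pvBestP_append] at h
    intro p hp
    cases hq : pvBestP l with
    | none =>
      rw [hq] at h
      replace h : some x = some m := h
      cases h
      have hl : l = [] := (pvBestP_eq_none_iff l).mp hq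
      subst hl
      have : p = x := by simpa using hp
      subst this
      omega
    | some q =>
      rw [hq] at h
      replace h : (if x.1 < q.1 then some x else some q) = some m := h
      rcases List.mem_append.mp hp with hl | hx
      · have hqp := ih q hq p hl
        by_cases hlt : x.1 < q.1
        · rw [if_pos hlt] at h; cases h; omega
        · rw [if_neg hlt] at h; cases h; exact hqp
      · have hx' : p = x := by simpa using hx
        by_cases hlt : x.1 < q.1
        · rw [if_pos hlt] at h; cases h; rw [hx']
        · rw [if_neg hlt] at h; cases h; rw [hx']; omega

-- head of the stable insertion sort = running strict-< minimum (stability, as used here)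
lemma pv_sorted_head (ps : List (Int × String)) :
    (PySem.List.sorted ps (fun p => p.1) false).head? = pvBestP ps := by
  induction ps using List.reverseRecOn with
  | nil => rfl
  | append_singleton l x ih =>
    rw [PySem.List.sorted_eq_foldl_insertBy] at *
    rw [List.foldl_append, List.foldl_cons, List.foldl_nil, pvBestP_append]
    cases hs : List.foldl (fun acc x => PySem.List.insertBy (fun a b => decide (a.1 < b.1)) x acc) [] l with
    | nil =>
      rw [hs] at ih
      simp at ih
      rw [← ih]
      rfl
    | cons y t =>
      rw [hs] at ih
      simp at ih
      rw [← ih]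
      show (PySem.List.insertBy (fun a b => decide (a.1 < b.1)) x (y :: t)).head? = _
      unfold PySem.List.insertBy
      by_cases hlt : x.1 < y.1 <;> simp [hlt]

-- the A-side fold, characterized by pvBestP of the B-side pairs and a count
lemma pv_main (rd : String) (l : List String)
    (hpre : ∀ cw ∈ l, cw.toList.length ≤ rd.toList.length) :
    l.foldl (pvStepA rd) (none, none, 0) =
      match pvBestP (l.map (fun cw => (pvHammingB cw rd, cw))) with
      | none => (none, none, 0)
      | some q => (some q.1, some q.2,
          ((l.map (fun cw => pvHammingB cw rd)).count q.1 : Int)) := by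
  induction l using List.reverseRecOn with
  | nil => rfl
  | append_singleton l x ih =>
    have hpl : ∀ cw ∈ l, cw.toList.length ≤ rd.toList.length :=
      fun cw hcw => hpre cw (by simp [hcw])
    have hpx : pvHammingA x rd = pvHammingB x rd := pv_ham_eq x rd (hpre x (by simp))
    rw [List.foldl_append, List.foldl_cons, List.foldl_nil, ih hpl]
    rw [show (l ++ [x]).map (fun cw => (pvHammingB cw rd, cw))
        = l.map (fun cw => (pvHammingB cw rd, cw)) ++ [(pvHammingB x rd, x)] by simp,
      pvBestP_append,
      show (l ++ [x]).map (fun cw => pvHammingB cw rd)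
        = l.map (fun cw => pvHammingB cw rd) ++ [pvHammingB x rd] by simp]
    cases hq : pvBestP (l.map (fun cw => (pvHammingB cw rd, cw))) with
    | none =>
      have hl : l = [] := by
        have := (pvBestP_eq_none_iff _).mp hq
        cases l with
        | nil => rfl
        | cons a t => simp at this
      subst hl
      simp [pvStepA, hpx]
    | some q =>
      have hmin := pvBestP_isMin _ q hq
      rcases lt_trichotomy (pvHammingB x rd) q.1 with hlt | heq | hgt
      · -- strictly smaller: new candidate, count resets to 1
        have hz : (l.map (fun cw => pvHammingB cw rd)).count (pvHammingB x rd) = 0 := by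
          rw [List.count_eq_zero]
          intro hmem
          obtain ⟨cw, hcw, hval⟩ := List.mem_map.mp hmem
          have h1 : q.1 ≤ pvHammingB cw rd :=
            hmin (pvHammingB cw rd, cw) (List.mem_map.mpr ⟨cw, hcw, rfl⟩)
          rw [hval] at h1
          omega
        simp [pvStepA, hpx, hlt, List.count_append, hz]
      · simp [pvStepA, hpx, heq, List.count_append]
      · simp [pvStepA, hpx, show ¬ pvHammingB x rd < q.1 by omega,
              show pvHammingB x rd ≠ q.1 by omega, List.count_append]

-- count of the minimal key in the pairs, read off the sorted list's first two entries
lemma pv_count_sorted (ps : List (Int × String)) (p0 : Int × String) (rest : List (Int × String))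
    (hs : PySem.List.sorted ps (fun p => p.1) false = p0 :: rest) :
    (ps.map (fun p => p.1)).count p0.1 =
      1 + (match rest with
           | [] => 0
           | p1 :: _ => if p1.1 = p0.1 then 1 + 0 else 0) +
        (match rest with
         | [] => 0
         | p1 :: t => if p1.1 = p0.1 then (t.map (fun p => p.1)).count p0.1 else 0) := by
  have hperm : (PySem.List.sorted ps (fun p => p.1) false).Perm ps :=
    PySem.List.sorted_perm ps (fun p => p.1) false
  have hcnt : (ps.map (fun p => p.1)).count p0.1
      = ((p0 :: rest).map (fun p => p.1)).count p0.1 :=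
    (List.Perm.count_eq (List.Perm.map _ (hs ▸ hperm)) p0.1).symm
  rw [hcnt]
  have hpw : (p0 :: rest).Pairwise (fun a b => a.1 ≤ b.1) := by
    have := PySem.List.sorted_pairwise ps (fun p => p.1)
    rwa [hs] at this
  cases rest with
  | nil => simp
  | cons p1 t =>
    have hpw1 : ∀ p ∈ p1 :: t, p0.1 ≤ p.1 := fun p hp => (List.pairwise_cons.mp hpw).1 p hp
    have hpwt : ∀ p ∈ t, p1.1 ≤ p.1 :=
      fun p hp => (List.pairwise_cons.mp (List.pairwise_cons.mp hpw).2).1 p hp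
    by_cases he : p1.1 = p0.1
    · simp [he]
      try omega
    · have hgt : p0.1 < p1.1 := lt_of_le_of_ne (hpw1 p1 (by simp)) (Ne.symm he)
      have hz : (t.map (fun p => p.1)).count p0.1 = 0 := by
        rw [List.count_eq_zero]
        intro hmem
        obtain ⟨p, hp, hval⟩ := List.mem_map.mp hmem
        have := hpwt p hp
        omega
      simp [he, hz]
      try omega

-- ===== VERDICT (by name: the statement is the Claim_ definition above) =====
theorem checking_codewords_spec : Claim_equal_checking_codewords := by
  intro cws rd hdom hpre
  unfold Spec_checking_codewords
  unfold checking_codewords checking_codewords_alt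
  rw [pv_main rd cws hpre]
  cases hs : PySem.List.sorted (cws.map (fun cw => (pvHammingB cw rd, cw))) (fun p => p.1) false with
  | nil =>
    have hnil : cws.map (fun cw => (pvHammingB cw rd, cw)) = [] :=
      (PySem.List.sorted_eq_nil_iff _ _ _).mp hs
    rw [(pvBestP_eq_none_iff _).mpr hnil]
    rfl
  | cons p0 rest =>
    have hhead : pvBestP (cws.map (fun cw => (pvHammingB cw rd, cw))) = some p0 := by
      rw [← pv_sorted_head, hs]; rfl
    rw [hhead]
    have hmap : (cws.map (fun cw => (pvHammingB cw rd, cw))).map (fun p => p.1)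
        = cws.map (fun cw => pvHammingB cw rd) := by
      rw [List.map_map]; rfl
    have hcnt := pv_count_sorted _ p0 rest hs
    rw [hmap] at hcnt
    cases rest with
    | nil =>
      simp only at hcnt
      simp [hcnt]
    | cons p1 t =>
      by_cases he : p1.1 = p0.1
      · have : (cws.map (fun cw => pvHammingB cw rd)).count p0.1
            = 2 + (t.map (fun p => p.1)).count p0.1 := by
          simp only [he, if_pos] at hcnt; omega
        simp [this, he]
        omega
      · simp only [he, if_false] at hcnt
        have h1 : (cws.map (fun cw => pvHammingB cw rd)).count p0.1 = 1 := by omega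
        simp [h1, he]
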